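-- pv_equiv track=rewrite | github.com/devrereg/coding-test | level0/x사이의 갯수/solution.py | solution
-- ===== SOURCE A (Python) =====
-- def solution(myString):
--     answer = [0]
--     index = 0
--     for i, c in enumerate(myString):
--         if c == 'x':
--             answer += [0]
--             index += 1
--         else:
--             answer[index] += 1
--
--     return answer
-- ===== SOURCE B (Python) =====
-- def solution(myString):
--     return [len(s) for s in myString.split('x')]
-- ===== Notes on version B (the rewrite author's own statement) =====
-- stated objective: idiomatic
-- what changed: Replaces the running-counter character loop with index bookkeeping by splitting the string on the separator and mapping each segment to its length.
import Mathlib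
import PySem

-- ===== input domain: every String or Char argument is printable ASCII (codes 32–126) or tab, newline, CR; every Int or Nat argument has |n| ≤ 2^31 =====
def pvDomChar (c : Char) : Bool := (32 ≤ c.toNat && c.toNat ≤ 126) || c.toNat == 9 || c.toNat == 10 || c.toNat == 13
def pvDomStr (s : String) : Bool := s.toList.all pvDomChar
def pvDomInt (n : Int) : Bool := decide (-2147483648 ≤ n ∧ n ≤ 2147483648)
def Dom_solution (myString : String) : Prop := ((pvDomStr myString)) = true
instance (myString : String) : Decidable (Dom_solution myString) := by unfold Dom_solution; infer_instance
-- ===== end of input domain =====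

-- B replaces A's running-counter loop (index bookkeeping into a growing list) by
-- splitting the string on 'x' and mapping each segment to its length (idiomatic).


-- ===== PORT A =====
-- one loop step of A: answer += [0] / index += 1 on 'x', else answer[index] += 1
def solutionStep (st : List Int × Nat) (ic : Int × Char) : List Int × Nat :=
  if ic.2 = 'x' then (st.1 ++ [0], st.2 + 1)
  else (st.1.modify st.2 (· + 1), st.2)

def solution (myString : String) : List Int :=
  ((PySem.List.enumerate myString.toList).foldl solutionStep ([0], 0)).1

-- ===== PORT B =====
-- Source B: return [len(s) for s in myString.split('x')]  (split with a nonempty sep → Chars.splitOn)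
def solution_alt (myString : String) : List Int :=
  (PySem.Chars.splitOn myString.toList ['x']).map (fun s => (s.length : Int))

-- ===== PRECONDITION & SPEC =====
def Spec_solution (myString : String) (out : List Int) : Prop := out = solution_alt myString
instance (myString : String) (out : List Int) : Decidable (Spec_solution myString out) := by unfold Spec_solution; infer_instance

-- ===== CLAIM (what is proved, stated in full; the proofs are below) =====
def Claim_equal_solution : Prop := ∀ (myString : String), Dom_solution myString → Spec_solution myString (solution myString)

-- ===== LEMMAS AND PROOFS =====

-- a simple structural split on 'x', used only in the proofs
def splitSimple : List Char → List (List Char)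
  | [] => [[]]
  | c :: cs =>
    if c = 'x' then [] :: splitSimple cs
    else match splitSimple cs with
      | [] => [[c]]
      | s :: r => (c :: s) :: r

theorem splitSimple_ne_nil (cs : List Char) : splitSimple cs ≠ [] := by
  cases cs with
  | nil => simp [splitSimple]
  | cons c cs =>
    simp only [splitSimple]
    split
    · simp
    · split <;> simp

-- splitOn.go with enough fuel computes acc.reverse ++ (cur.reverse merged into the first simple segment)
theorem splitOn_go_eq (fuel : Nat) (l cur : List Char) (acc : List (List Char))
    (hf : l.length ≤ fuel) :
    PySem.Chars.splitOn.go ['x'] fuel l cur acc =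
      acc.reverse ++ (match splitSimple l with
        | [] => [cur.reverse]
        | s :: r => (cur.reverse ++ s) :: r) := by
  induction fuel generalizing l cur acc with
  | zero =>
    have : l = [] := by cases l <;> simp_all
    subst this
    simp [PySem.Chars.splitOn.go, splitSimple]
  | succ f ih =>
    cases l with
    | nil => simp [PySem.Chars.splitOn.go, splitSimple]
    | cons c rest =>
      simp only [PySem.Chars.splitOn.go]
      by_cases hc : c = 'x'
      · subst hc
        rw [if_pos (by simp [List.isPrefixOf])]
        simp only [List.length_cons, List.length_nil, List.drop_succ_cons, List.drop_zero]
        rw [ih rest [] (List.reverse cur :: acc) (by simpa using Nat.le_of_succ_le_succ hf)]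
        have h := splitSimple_ne_nil rest
        cases hs : splitSimple rest with
        | nil => exact absurd hs h
        | cons s r => simp [splitSimple, hs]
      · rw [if_neg (by simp [List.isPrefixOf]; exact fun h => hc h.symm)]
        rw [ih rest (c :: cur) acc (by simpa using Nat.le_of_succ_le_succ hf)]
        have h := splitSimple_ne_nil rest
        cases hs : splitSimple rest with
        | nil => exact absurd hs h
        | cons s r => simp [splitSimple, hs, hc]

theorem splitOn_eq_splitSimple (cs : List Char) :
    PySem.Chars.splitOn cs ['x'] = splitSimple cs := by
  unfold PySem.Chars.splitOn
  rw [splitOn_go_eq (cs.length + 1) cs [] [] (by omega)]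
  have h := splitSimple_ne_nil cs
  cases hs : splitSimple cs with
  | nil => exact absurd hs h
  | cons s r => simp

-- A's fold ignores the enumerate index, so it only depends on the characters
theorem foldl_enumerate_step (cs : List Char) (st : List Int × Nat) (s : Int) :
    (PySem.List.enumerate cs s).foldl solutionStep st =
      cs.foldl (fun t c => solutionStep t (0, c)) st := by
  induction cs generalizing st s with
  | nil => simp [PySem.List.enumerate]
  | cons c cs ih => simp [PySem.List.enumerate, List.foldl, ih, solutionStep]

theorem modify_append_singleton (A : List Int) (k : Int) (f : Int → Int) :
    (A ++ [k]).modify A.length f = A ++ [f k] := by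
  induction A with
  | nil => simp [List.modify]
  | cons a A ih => simp [ih]

-- the loop invariant: with answer = A ++ [k] and index = A.length, the final answer is
-- A with the remaining segments' lengths appended, k added into the first segment
theorem loop_invariant (cs : List Char) (A : List Int) (k : Int) :
    (cs.foldl (fun t c => solutionStep t (0, c)) (A ++ [k], A.length)).1 =
      A ++ (match splitSimple cs with
        | [] => [k]
        | s :: r => (k + s.length) :: r.map (fun t => (t.length : Int))) := by
  induction cs generalizing A k with
  | nil => simp [splitSimple]
  | cons c cs ih =>
    simp only [List.foldl]
    by_cases hc : c = 'x'
    · subst hc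
      have step : solutionStep (A ++ [k], A.length) (0, 'x') = ((A ++ [k]) ++ [0], (A ++ [k]).length) := by
        simp [solutionStep]
      rw [step, ih (A ++ [k]) 0]
      have h := splitSimple_ne_nil cs
      cases hs : splitSimple cs with
      | nil => exact absurd hs h
      | cons s r => simp [splitSimple, hs]
    · have step : solutionStep (A ++ [k], A.length) (0, c) = (A ++ [k + 1], A.length) := by
        simp [solutionStep, hc, modify_append_singleton]
      rw [step, ih A (k + 1)]
      have h := splitSimple_ne_nil cs
      cases hs : splitSimple cs with
      | nil => exact absurd hs h
      | cons s r =>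
        have he : ((k + 1 : Int) + (s.length : Int)) = k + (((s.length + 1 : Nat) : Nat) : Int) := by
          push_cast; ring
        simp only [splitSimple, if_neg hc, hs, List.length_cons, he]

-- ===== VERDICT (by name: the statement is the Claim_ definition above) =====
theorem solution_spec : Claim_equal_solution := by
  intro myString _
  unfold Spec_solution solution solution_alt
  rw [foldl_enumerate_step myString.toList ([0], 0) 0]
  have h0 : (([0], 0) : List Int × Nat) = (([] : List Int) ++ [0], ([] : List Int).length) := by simp
  rw [h0, loop_invariant myString.toList [] 0, splitOn_eq_splitSimple]
  have h := splitSimple_ne_nil myString.toList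
  cases hs : splitSimple myString.toList with
  | nil => exact absurd hs h
  | cons s r => simp
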